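-- pv_equiv track=rewrite | github.com/gilianhonkoop/OpenSourceSensei | sensei/buffer_loader_scripts/minihack_utils.py | find_substring_coordinates
-- ===== SOURCE A (Python) =====
-- def find_substring_coordinates(description, substrings, grid_width=5):
--     """
--     Find the first occurrence of any of the substrings in the grid and return its coordinates.
--
--     :param strings: List of strings representing the grid row-wise.
--     :param substrings: List of substrings to search for.
--     :param grid_width: The width of the grid (default is 5 for a 5x5 grid).
--     :return: Tuple of (row, column) if a substring is found, otherwise None.
--     """
--     all_coordinates = []
--
--     for index, string in enumerate(description):
--         if any(sub in string for sub in substrings):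
--             # Calculate the row and column from the index
--             row = index // grid_width
--             column = index % grid_width
--             all_coordinates.append((row, column))
--
--     return all_coordinates
-- ===== SOURCE B (Python) =====
-- def find_substring_coordinates(description, substrings, grid_width=5):
--     # Different decomposition: outer loop over substrings collects the set of
--     # matched row indices (skipping rows already matched), then one pass maps
--     # the sorted indices to coordinates.
--     matched = set()
--     for sub in substrings:
--         for index, string in enumerate(description):
--             if index not in matched and sub in string:
--                 matched.add(index)
--     return [divmod(index, grid_width) for index in sorted(matched)]
-- ===== Notes on version B (the rewrite author's own statement) =====
-- stated objective: alternative
-- what changed: B inverts the loop nesting: it scans per substring, collecting a set of matched row indices (skipping rows already matched), then maps the sorted indices to divmod coordinates, instead of A's single enumerate pass testing any(substring) per row.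
import Mathlib
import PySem

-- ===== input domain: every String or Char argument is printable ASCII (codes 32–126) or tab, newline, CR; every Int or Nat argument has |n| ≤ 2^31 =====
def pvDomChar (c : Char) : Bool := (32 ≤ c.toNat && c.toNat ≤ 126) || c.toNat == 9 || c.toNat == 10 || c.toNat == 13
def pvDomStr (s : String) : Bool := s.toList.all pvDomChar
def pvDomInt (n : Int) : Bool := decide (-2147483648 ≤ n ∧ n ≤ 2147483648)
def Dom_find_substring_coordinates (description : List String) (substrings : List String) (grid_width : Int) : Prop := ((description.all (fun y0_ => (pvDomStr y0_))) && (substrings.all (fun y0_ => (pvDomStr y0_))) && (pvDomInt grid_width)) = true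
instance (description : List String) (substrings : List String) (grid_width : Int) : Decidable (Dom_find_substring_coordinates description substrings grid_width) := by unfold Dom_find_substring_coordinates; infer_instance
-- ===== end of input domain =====

-- B inverts the loop nesting (per-substring scans into a set of indices, then sorted indices
-- mapped to divmod coordinates) instead of A's single enumerate pass; alternative decomposition,
-- return values proved equal wherever A returns (grid_width = 0 with a match raises in both).


-- ===== PORT A =====
def find_substring_coordinates (description : List String) (substrings : List String) (grid_width : Int) : List (Int × Int) :=
  (PySem.List.enumerate description 0).foldl
    (fun all_coordinates p =>
      if substrings.any (fun sub => PySem.Str.isIn sub p.2) then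
        all_coordinates ++ [(PySem.Int.floordiv p.1 grid_width, PySem.Int.mod p.1 grid_width)]
      else all_coordinates) []

-- ===== PORT B =====
def find_substring_coordinates_alt (description : List String) (substrings : List String) (grid_width : Int) : List (Int × Int) :=
  (PySem.List.sorted
      (substrings.foldl
        (fun matched sub =>
          (PySem.List.enumerate description 0).foldl
            (fun matched p =>
              if !PySem.Set.contains matched p.1 && PySem.Str.isIn sub p.2 then
                PySem.Set.add matched p.1
              else matched)
            matched)
        (PySem.Set.empty : PySem.Set Int))
      (fun i => i)).map
    (fun i => (PySem.Int.floordiv i grid_width, PySem.Int.mod i grid_width))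

-- ===== PRECONDITION & SPEC =====
-- Pre_ excludes exactly the inputs where A raises ZeroDivisionError: grid_width = 0 while some
-- row matches some substring (on all other inputs A returns normally).
def Pre_find_substring_coordinates (description : List String) (substrings : List String) (grid_width : Int) : Prop :=
  grid_width ≠ 0 ∨ ∀ s ∈ description, ∀ sub ∈ substrings, PySem.Str.isIn sub s = false

instance (description : List String) (substrings : List String) (grid_width : Int) : Decidable (Pre_find_substring_coordinates description substrings grid_width) := by unfold Pre_find_substring_coordinates; infer_instance

def pvWitness_find_substring_coordinates : List String × List String × Int := (["abc", "de", "xy", "qz"], ["d", "z"], 2)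

def Spec_find_substring_coordinates (description : List String) (substrings : List String) (grid_width : Int) (out : List (Int × Int)) : Prop := out = find_substring_coordinates_alt description substrings grid_width
instance (description : List String) (substrings : List String) (grid_width : Int) (out : List (Int × Int)) : Decidable (Spec_find_substring_coordinates description substrings grid_width out) := by unfold Spec_find_substring_coordinates; infer_instance

-- ===== CLAIM (what is proved, stated in full; the proofs are below) =====
def Claim_equal_find_substring_coordinates : Prop := ∀ (description : List String) (substrings : List String) (grid_width : Int), Dom_find_substring_coordinates description substrings grid_width → Pre_find_substring_coordinates description substrings grid_width → Spec_find_substring_coordinates description substrings grid_width (find_substring_coordinates description substrings grid_width)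


-- ===== LEMMAS AND PROOFS =====

-- The strictly increasing list of matched indices, the common skeleton of both results.
def pvIdxs (description : List String) (substrings : List String) : List Int :=
  (((PySem.List.enumerate description 0).filter
      (fun p => substrings.any (fun sub => PySem.Str.isIn sub p.2))).map (fun p => p.1))

theorem pvMem_inner (sub : String) (l : List (Int × String)) (m : PySem.Set Int) (i : Int) :
    (i ∈ l.foldl (fun m p => if PySem.Str.isIn sub p.2 then PySem.Set.add m p.1 else m) m) ↔
      i ∈ m ∨ ∃ p ∈ l, PySem.Str.isIn sub p.2 = true ∧ i = p.1 := by
  induction l generalizing m with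
  | nil => simp
  | cons q t ih =>
    simp only [List.foldl_cons, ih, List.mem_cons]
    split_ifs with h
    · simp only [PySem.Set.mem_add]
      constructor
      · rintro (⟨him | rfl⟩ | ⟨p, hp, hin, rfl⟩)
        · exact Or.inl him
        · exact Or.inr ⟨q, Or.inl rfl, h, rfl⟩
        · exact Or.inr ⟨p, Or.inr hp, hin, rfl⟩
      · rintro (him | ⟨p, (rfl | hp), hin, rfl⟩)
        · exact Or.inl (Or.inl him)
        · exact Or.inl (Or.inr rfl)
        · exact Or.inr ⟨p, hp, hin, rfl⟩
    · constructor
      · rintro (him | ⟨p, hp, hin, rfl⟩)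
        · exact Or.inl him
        · exact Or.inr ⟨p, Or.inr hp, hin, rfl⟩
      · rintro (him | ⟨p, (rfl | hp), hin, rfl⟩)
        · exact Or.inl him
        · exact absurd hin h
        · exact Or.inr ⟨p, hp, hin, rfl⟩

theorem pvNodup_inner (sub : String) (l : List (Int × String)) (m : PySem.Set Int)
    (hm : m.Nodup) :
    (l.foldl (fun m p => if PySem.Str.isIn sub p.2 then PySem.Set.add m p.1 else m) m).Nodup := by
  induction l generalizing m with
  | nil => exact hm
  | cons q t ih =>
    simp only [List.foldl_cons]
    split_ifs with h
    · exact ih _ (PySem.Set.nodup_add m q.1 hm)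
    · exact ih _ hm

theorem pvMem_outer (s : List String) (l : List (Int × String)) (m : PySem.Set Int) (i : Int) :
    (i ∈ s.foldl (fun m sub =>
        l.foldl (fun m p => if PySem.Str.isIn sub p.2 then PySem.Set.add m p.1 else m) m) m) ↔
      i ∈ m ∨ ∃ sub ∈ s, ∃ p ∈ l, PySem.Str.isIn sub p.2 = true ∧ i = p.1 := by
  induction s generalizing m with
  | nil => simp
  | cons a t ih =>
    simp only [List.foldl_cons, ih, pvMem_inner, List.mem_cons]
    constructor
    · rintro (⟨him | ⟨p, hp, hin, rfl⟩⟩ | ⟨sub, hsub, p, hp, hin, rfl⟩)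
      · exact Or.inl him
      · exact Or.inr ⟨a, Or.inl rfl, p, hp, hin, rfl⟩
      · exact Or.inr ⟨sub, Or.inr hsub, p, hp, hin, rfl⟩
    · rintro (him | ⟨sub, (rfl | hsub), p, hp, hin, rfl⟩)
      · exact Or.inl (Or.inl him)
      · exact Or.inl (Or.inr ⟨p, hp, hin, rfl⟩)
      · exact Or.inr ⟨sub, hsub, p, hp, hin, rfl⟩

theorem pvNodup_outer (s : List String) (l : List (Int × String)) (m : PySem.Set Int)
    (hm : m.Nodup) :
    (s.foldl (fun m sub =>
        l.foldl (fun m p => if PySem.Str.isIn sub p.2 then PySem.Set.add m p.1 else m) m) m).Nodup := by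
  induction s generalizing m with
  | nil => exact hm
  | cons a t ih =>
    simp only [List.foldl_cons]
    exact ih _ (pvNodup_inner a l m hm)

theorem pvPairwise_idxs (description substrings : List String) :
    (pvIdxs description substrings).Pairwise (· < ·) := by
  unfold pvIdxs
  exact List.pairwise_map.mpr
    ((PySem.List.pairwise_lt_enumerate description 0).filter _)

theorem pvMem_idxs (description substrings : List String) (i : Int) :
    i ∈ pvIdxs description substrings ↔
      ∃ sub ∈ substrings, ∃ p ∈ PySem.List.enumerate description 0,
        PySem.Str.isIn sub p.2 = true ∧ i = p.1 := by
  unfold pvIdxs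
  simp only [List.mem_map, List.mem_filter, List.any_eq_true]
  constructor
  · rintro ⟨p, ⟨hp, sub, hsub, hin⟩, rfl⟩
    exact ⟨sub, hsub, p, hp, hin, rfl⟩
  · rintro ⟨sub, hsub, p, hp, hin, rfl⟩
    exact ⟨p, ⟨hp, sub, hsub, hin⟩, rfl⟩

theorem pvA_eq_map (description substrings : List String) (grid_width : Int) :
    find_substring_coordinates description substrings grid_width =
      (pvIdxs description substrings).map
        (fun i => (PySem.Int.floordiv i grid_width, PySem.Int.mod i grid_width)) := by
  unfold find_substring_coordinates pvIdxs
  rw [PySem.List.foldl_append_if]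
  simp [List.map_map, Function.comp]

-- B's 'index not in matched' skip is a no-op: adding a present element leaves the set unchanged.
theorem pvStep_eq (sub : String) (m : PySem.Set Int) (p : Int × String) :
    (if !PySem.Set.contains m p.1 && PySem.Str.isIn sub p.2 then PySem.Set.add m p.1 else m) =
      (if PySem.Str.isIn sub p.2 then PySem.Set.add m p.1 else m) := by
  by_cases hc : p.1 ∈ m
  · have hadd : PySem.Set.add m p.1 = m := by simp [PySem.Set.add, hc]
    simp [PySem.Set.contains_iff, hc, hadd]
  · simp [PySem.Set.contains_iff, hc]

theorem pvB_sorted_eq (description substrings : List String) (grid_width : Int) :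
    find_substring_coordinates_alt description substrings grid_width =
      (pvIdxs description substrings).map
        (fun i => (PySem.Int.floordiv i grid_width, PySem.Int.mod i grid_width)) := by
  unfold find_substring_coordinates_alt
  simp only [pvStep_eq]
  have hnd : (substrings.foldl
      (fun matched sub =>
        (PySem.List.enumerate description 0).foldl
          (fun matched p => if PySem.Str.isIn sub p.2 then PySem.Set.add matched p.1 else matched)
          matched) (PySem.Set.empty : PySem.Set Int)).Nodup :=
    pvNodup_outer substrings _ PySem.Set.empty List.nodup_nil
  have hperm : (pvIdxs description substrings).Perm
      (substrings.foldl
        (fun matched sub =>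
          (PySem.List.enumerate description 0).foldl
            (fun matched p => if PySem.Str.isIn sub p.2 then PySem.Set.add matched p.1 else matched)
            matched) (PySem.Set.empty : PySem.Set Int)) := by
    rw [List.perm_ext_iff_of_nodup ((pvPairwise_idxs description substrings).imp ne_of_lt) hnd]
    intro i
    rw [pvMem_idxs, pvMem_outer]
    simp [PySem.Set.empty]
  rw [PySem.List.sorted_eq_of_perm_of_pairwise_lt _ _ _ hperm
    (pvPairwise_idxs description substrings)]

-- ===== VERDICT (by name: the statement is the Claim_ definition above) =====
theorem find_substring_coordinates_spec : Claim_equal_find_substring_coordinates := by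
  intro d s w _ _
  unfold Spec_find_substring_coordinates
  rw [pvA_eq_map, pvB_sorted_eq]
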